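-- pv_equiv track=rewrite | github.com/aiki711/dirunc_probe | scripts/02_make_dirunc_dataset.py | get_last_k_user_turn_indices
-- ===== SOURCE A (Python) =====
-- from typing import Any, Dict, Iterable, List, Optional, Sequence, Tuple
--
-- def is_user_turn(turn: Dict[str, Any]) -> bool:
--     # SGD usually uses 'USER' for user and 'SYSTEM' for assistant
--     return turn.get("speaker", "").upper() == "USER"
--
-- def get_last_k_user_turn_indices(dialogue: Dict[str, Any], t_idx: int, k: int) -> List[int]:
--     """Return indices of last k user turns ending at t_idx (which must be a user turn)."""
--     user_idxs = []
--     for j in range(t_idx, -1, -1):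
--         if is_user_turn(dialogue["turns"][j]):
--             user_idxs.append(j)
--             if len(user_idxs) == k:
--                 break
--     return list(reversed(user_idxs))
-- ===== SOURCE B (Python) =====
-- def is_user_turn(turn):
--     # SGD usually uses 'USER' for user and 'SYSTEM' for assistant
--     return turn.get("speaker", "").upper() == "USER"
--
-- def get_last_k_user_turn_indices(dialogue, t_idx, k):
--     """Return indices of last k user turns ending at t_idx (which must be a user turn)."""
--     turns = dialogue["turns"]
--     user_idxs = [j for j in range(t_idx + 1) if is_user_turn(turns[j])]
--     return user_idxs[-k:] if k > 0 else user_idxs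
-- ===== Notes on version B (the rewrite author's own statement) =====
-- stated objective: simpler
-- what changed: Replaces the backward scan with early break and final reversal by a forward comprehension over turns[0..t_idx] (already ascending) followed by a last-k slice (all of them when k <= 0).
-- outside the precondition, e.g. on get_last_k_user_turn_indices({}, -1, 1): A returns [], B raises KeyError
import Mathlib
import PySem

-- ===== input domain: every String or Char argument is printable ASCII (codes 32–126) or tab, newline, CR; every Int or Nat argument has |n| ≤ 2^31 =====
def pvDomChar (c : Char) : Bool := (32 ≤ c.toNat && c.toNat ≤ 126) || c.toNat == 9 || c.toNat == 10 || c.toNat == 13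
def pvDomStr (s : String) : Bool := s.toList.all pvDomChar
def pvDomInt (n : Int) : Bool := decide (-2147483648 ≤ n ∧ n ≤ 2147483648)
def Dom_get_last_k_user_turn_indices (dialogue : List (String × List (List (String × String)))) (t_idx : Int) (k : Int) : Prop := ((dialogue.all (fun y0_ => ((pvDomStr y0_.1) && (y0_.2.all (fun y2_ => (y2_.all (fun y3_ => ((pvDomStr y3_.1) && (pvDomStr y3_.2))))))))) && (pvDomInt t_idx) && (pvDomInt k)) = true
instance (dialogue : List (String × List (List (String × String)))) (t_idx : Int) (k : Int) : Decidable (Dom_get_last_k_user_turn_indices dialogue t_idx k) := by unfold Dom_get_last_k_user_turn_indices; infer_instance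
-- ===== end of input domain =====

-- B replaces A's backward scan with early break + final reversal by a forward filter over
-- indices 0..t_idx plus a last-k slice; objective: simpler.


-- ===== PORT A =====
-- turn.get("speaker", "").upper() == "USER"
def pv_is_user_turn (turn : List (String × String)) : Bool :=
  PySem.Str.upper ((PySem.Dict.mk turn).getD "speaker" "") == "USER"

-- the backward loop of A over the index list range(t_idx, -1, -1), with the len==k break
def pvA_loop (turns : List (List (String × String))) (k : Int) :
    List Int → List Int → List Int
  | [], acc => acc
  | j :: rest, acc =>
    if pv_is_user_turn ((PySem.List.pyGet? turns j).getD []) then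
      let acc' := acc ++ [j]
      if (acc'.length : Int) = k then acc' else pvA_loop turns k rest acc'
    else pvA_loop turns k rest acc

def get_last_k_user_turn_indices (dialogue : List (String × List (List (String × String)))) (t_idx : Int) (k : Int) : List Int :=
  (pvA_loop (((PySem.Dict.mk dialogue).get? "turns").getD []) k
    (PySem.List.pyRange t_idx (-1) (-1)) []).reverse

-- ===== PORT B =====
def get_last_k_user_turn_indices_alt (dialogue : List (String × List (List (String × String)))) (t_idx : Int) (k : Int) : List Int :=
  let turns := ((PySem.Dict.mk dialogue).get? "turns").getD []
  let user_idxs := (PySem.List.pyRange 0 (t_idx + 1) 1).filter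
    (fun j => pv_is_user_turn ((PySem.List.pyGet? turns j).getD []))
  if k > 0 then PySem.List.slice user_idxs (some (-k)) none else user_idxs

-- ===== PRECONDITION & SPEC =====
-- Pre_ excludes inputs where dialogue has no "turns" key or t_idx ≥ len(turns): there A raises
-- (KeyError/IndexError) for t_idx ≥ 0, and for t_idx < 0 with a missing key A returns [] only
-- because its empty loop never touches dialogue, while B's natural lookup raises KeyError.
def Pre_get_last_k_user_turn_indices (dialogue : List (String × List (List (String × String)))) (t_idx : Int) (k : Int) : Prop :=
  ((PySem.Dict.mk dialogue).get? "turns").isSome = true ∧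
  t_idx < ((((PySem.Dict.mk dialogue).get? "turns").getD []).length : Int)
instance (dialogue : List (String × List (List (String × String)))) (t_idx : Int) (k : Int) : Decidable (Pre_get_last_k_user_turn_indices dialogue t_idx k) := by unfold Pre_get_last_k_user_turn_indices; infer_instance

def pvWitness_get_last_k_user_turn_indices : (List (String × List (List (String × String)))) × Int × Int :=
  ([("turns", [[("speaker", "USER")], [("speaker", "SYSTEM")], [("speaker", "USER")]])], 2, 1)

def Spec_get_last_k_user_turn_indices (dialogue : List (String × List (List (String × String)))) (t_idx : Int) (k : Int) (out : List Int) : Prop := out = get_last_k_user_turn_indices_alt dialogue t_idx k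
instance (dialogue : List (String × List (List (String × String)))) (t_idx : Int) (k : Int) (out : List Int) : Decidable (Spec_get_last_k_user_turn_indices dialogue t_idx k out) := by unfold Spec_get_last_k_user_turn_indices; infer_instance

-- ===== CLAIM (what is proved, stated in full; the proofs are below) =====
def Claim_equal_get_last_k_user_turn_indices : Prop := ∀ (dialogue : List (String × List (List (String × String)))) (t_idx : Int) (k : Int), Dom_get_last_k_user_turn_indices dialogue t_idx k → Pre_get_last_k_user_turn_indices dialogue t_idx k → Spec_get_last_k_user_turn_indices dialogue t_idx k (get_last_k_user_turn_indices dialogue t_idx k)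

-- ===== LEMMAS AND PROOFS =====

-- with k ≤ 0 the break never fires: the loop appends every passing index
theorem pvA_loop_of_nonpos (turns : List (List (String × String))) (k : Int) (hk : k ≤ 0)
    (js acc : List Int) :
    pvA_loop turns k js acc
      = acc ++ js.filter (fun j => pv_is_user_turn ((PySem.List.pyGet? turns j).getD [])) := by
  induction js generalizing acc with
  | nil => simp [pvA_loop]
  | cons j rest ih =>
    simp only [pvA_loop, List.filter_cons]
    split_ifs with h hbrk
    · exfalso; simp at hbrk; omega
    all_goals rw [ih]
    all_goals simp

-- with 0 < k and room left, the loop appends the first (k - |acc|) passing indices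
theorem pvA_loop_of_pos (turns : List (List (String × String))) (k : Int)
    (js acc : List Int) (h : (acc.length : Int) < k) :
    pvA_loop turns k js acc
      = acc ++ (js.filter (fun j => pv_is_user_turn ((PySem.List.pyGet? turns j).getD []))).take
          (k - acc.length).toNat := by
  induction js generalizing acc with
  | nil => simp [pvA_loop]
  | cons j rest ih =>
    simp only [pvA_loop, List.filter_cons]
    split_ifs with hp hbrk
    · -- passes and break: k - |acc| = 1
      have : (k - (acc.length : Int)).toNat = 1 := by
        simp at hbrk; omega
      simp [this]
    · -- passes, no break
      have h' : ((acc ++ [j]).length : Int) < k := by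
        simp at hbrk ⊢; omega
      rw [ih _ h']
      have : (k - (acc.length : Int)).toNat = (k - ((acc ++ [j]).length : Int)).toNat + 1 := by
        simp at hbrk ⊢; omega
      simp [this, List.take_succ_cons]
    · rw [ih _ h]

-- ===== VERDICT (by name: the statement is the Claim_ definition above) =====
theorem get_last_k_user_turn_indices_spec : Claim_equal_get_last_k_user_turn_indices := by
  intro dialogue t_idx k _ hpre
  unfold Spec_get_last_k_user_turn_indices
  unfold get_last_k_user_turn_indices get_last_k_user_turn_indices_alt
  set turns := ((PySem.Dict.mk dialogue).get? "turns").getD [] with hturns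
  set p : Int → Bool := fun j => pv_is_user_turn ((PySem.List.pyGet? turns j).getD []) with hp
  have hrev : PySem.List.pyRange t_idx (-1) (-1)
      = (PySem.List.pyRange 0 (t_idx + 1) 1).reverse := by
    simpa using PySem.List.pyRange_neg_one_eq_reverse t_idx (-1)
  set u := (PySem.List.pyRange 0 (t_idx + 1) 1).filter p with hu
  by_cases hk : k > 0
  · rw [hrev, pvA_loop_of_pos _ _ _ _ (by simp; omega)]
    have hkk : -k = -((k.toNat : Nat) : Int) := by omega
    rw [if_pos hk, hkk, PySem.List.slice_from_neg_natCast _ _ (by omega)]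
    simp only [List.nil_append, List.filter_reverse]
    rw [List.take_reverse, List.reverse_reverse]
    congr 1
    norm_num
  · rw [hrev, pvA_loop_of_nonpos _ _ (by omega)]
    rw [if_neg hk]
    simp only [List.nil_append, List.filter_reverse, List.reverse_reverse]
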